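-- pv_equiv track=rewrite | github.com/jgouch/Price_Update | pricebook_generator_v1.py | count_adjacent_pairs
-- ===== SOURCE A (Python) =====
-- from typing import Dict, Tuple, List, Any
--
-- def count_adjacent_pairs(nums: List[int]) -> int:
--     nums = sorted(set(nums))
--     used = set()
--     pairs = 0
--     for n in nums:
--         if n in used:
--             continue
--         if (n + 1) in nums and (n + 1) not in used:
--             used.add(n)
--             used.add(n + 1)
--             pairs += 1
--     return pairs
-- ===== SOURCE B (Python) =====
-- from typing import Dict, Tuple, List, Any
--
-- def count_adjacent_pairs(nums: List[int]) -> int: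
--     vals = sorted(set(nums))
--     total = 0
--     run = 0
--     prev = None
--     for v in vals:
--         if prev is not None and v == prev + 1:
--             run += 1
--         else:
--             total += run // 2
--             run = 1
--         prev = v
--     total += run // 2
--     return total
-- ===== Notes on version B (the rewrite author's own statement) =====
-- stated objective: faster
-- what changed: Replaces the greedy 'used'-set matching with a linear-list membership test per element by a single run-length pass over sorted(set(nums)) that adds floor(run_len/2) per maximal consecutive run.
import Mathlib
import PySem

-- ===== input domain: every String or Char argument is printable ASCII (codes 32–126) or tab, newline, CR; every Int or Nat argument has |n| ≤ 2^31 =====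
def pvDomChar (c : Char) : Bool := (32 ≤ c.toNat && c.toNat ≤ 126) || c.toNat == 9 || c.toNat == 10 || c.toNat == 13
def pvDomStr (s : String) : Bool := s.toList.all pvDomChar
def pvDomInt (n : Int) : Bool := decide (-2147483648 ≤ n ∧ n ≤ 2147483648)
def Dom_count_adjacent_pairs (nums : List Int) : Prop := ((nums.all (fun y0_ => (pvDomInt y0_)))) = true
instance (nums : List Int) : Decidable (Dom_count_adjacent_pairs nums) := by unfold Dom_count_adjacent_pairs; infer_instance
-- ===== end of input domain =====

-- B replaces A's greedy used-set matching by a single run-length pass over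
-- sorted(set(nums)), adding floor(run_len/2) per maximal consecutive run (simpler).


-- ===== PORT A =====
-- loop body of A: n skipped if in used; paired with n+1 when n+1 is in the (sorted) list and unused
def stepA (full : List Int) (st : PySem.Set Int × Int) (n : Int) : PySem.Set Int × Int :=
  if PySem.Set.contains st.1 n then st
  else if full.contains (n + 1) && !(PySem.Set.contains st.1 (n + 1)) then
    (PySem.Set.add (PySem.Set.add st.1 n) (n + 1), st.2 + 1)
  else st

def count_adjacent_pairs (nums : List Int) : Int :=
  let nums2 := PySem.List.sorted (PySem.Set.ofList nums) (fun x => x) false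
  (nums2.foldl (stepA nums2) (PySem.Set.empty, 0)).2

-- ===== PORT B =====
-- loop body of B: state (total, run, prev); extend the run or flush run // 2
def stepB (st : Int × Int × Option Int) (v : Int) : Int × Int × Option Int :=
  match st with
  | (total, run, prev) =>
    match prev with
    | some p =>
        if v = p + 1 then (total, run + 1, some v)
        else (total + PySem.Int.floordiv run 2, 1, some v)
    | none => (total + PySem.Int.floordiv run 2, 1, some v)

def count_adjacent_pairs_alt (nums : List Int) : Int :=
  let vals := PySem.List.sorted (PySem.Set.ofList nums) (fun x => x) false
  let st := vals.foldl stepB (0, 0, none)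
  st.1 + PySem.Int.floordiv st.2.1 2

-- ===== PRECONDITION & SPEC =====
def Spec_count_adjacent_pairs (nums : List Int) (out : Int) : Prop := out = count_adjacent_pairs_alt nums
instance (nums : List Int) (out : Int) : Decidable (Spec_count_adjacent_pairs nums out) := by unfold Spec_count_adjacent_pairs; infer_instance

-- ===== CLAIM (what is proved, stated in full; the proofs are below) =====
def Claim_equal_count_adjacent_pairs : Prop := ∀ (nums : List Int), Dom_count_adjacent_pairs nums → Spec_count_adjacent_pairs nums (count_adjacent_pairs nums)

-- ===== LEMMAS AND PROOFS =====

-- greedy pairing on a strictly increasing list, with an optional pending unpaired element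
def gp : Option Int → List Int → Int
  | _, [] => 0
  | some p, a :: t => if a = p + 1 then 1 + gp none t else gp (some a) t
  | none, a :: t => gp (some a) t

theorem loopA (t : List Int) (used : PySem.Set Int) (p : Int) (full : List Int)
    (h1 : t.Pairwise (· < ·))
    (h2 : ∀ n ∈ t, n ∉ used)
    (h3 : ∀ n : Int, n ∈ t → ((n + 1) ∈ full ↔ (n + 1) ∈ t)) :
    (t.foldl (stepA full) (used, p)).2 = p + gp none t := by
  match t with
  | [] => simp [gp]
  | [a] =>
      have hca : a ∉ used := h2 a (by simp)
      have hfa : a + 1 ∉ full := by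
        intro hc
        have := (h3 a (by simp)).mp hc
        simp at this
      simp [stepA, hca, hfa, gp]
  | a :: b :: t' =>
      have hab : a < b := by
        rcases List.pairwise_cons.mp h1 with ⟨ha, _⟩
        exact ha b (by simp)
      have hbt : ∀ n ∈ t', b < n := by
        intro n hn
        rcases List.pairwise_cons.mp h1 with ⟨_, h1'⟩
        rcases List.pairwise_cons.mp h1' with ⟨hbb, _⟩
        exact hbb n hn
      have hca : a ∉ used := h2 a (by simp)
      by_cases hb : b = a + 1
      · -- pair a with b = a+1
        have hfa : a + 1 ∈ full := (h3 a (by simp)).mpr (by simp [hb])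
        have hcb : a + 1 ∉ used := by rw [← hb]; exact h2 b (by simp)
        have step1 : stepA full (used, p) a
            = (PySem.Set.add (PySem.Set.add used a) (a + 1), p + 1) := by
          simp [stepA, hca, hfa, hcb]
        have hmemb : b ∈ PySem.Set.add (PySem.Set.add used a) (a + 1) := by
          rw [hb]
          exact (PySem.Set.mem_add _ _ _).mpr (Or.inr rfl)
        have step2 : stepA full (PySem.Set.add (PySem.Set.add used a) (a + 1), p + 1) b
            = (PySem.Set.add (PySem.Set.add used a) (a + 1), p + 1) := by
          simp [stepA, hmemb]
        have h1' : t'.Pairwise (· < ·) := by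
          rcases List.pairwise_cons.mp h1 with ⟨_, h1'⟩
          exact (List.pairwise_cons.mp h1').2
        have h2' : ∀ n ∈ t', n ∉ PySem.Set.add (PySem.Set.add used a) (a + 1) := by
          intro n hn hc
          rcases (PySem.Set.mem_add _ _ _).mp hc with hm | hm
          · rcases (PySem.Set.mem_add _ _ _).mp hm with hm' | hm'
            · exact h2 n (by simp [hn]) hm'
            · have := hbt n hn; omega
          · have := hbt n hn; omega
        have h3' : ∀ n : Int, n ∈ t' → ((n + 1) ∈ full ↔ (n + 1) ∈ t') := by
          intro n hn
          have hgt := hbt n hn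
          constructor
          · intro hc
            have hmem := (h3 n (by simp [hn])).mp hc
            rcases List.mem_cons.mp hmem with h | h
            · omega
            rcases List.mem_cons.mp h with h' | h'
            · omega
            · exact h'
          · intro hmem
            exact (h3 n (by simp [hn])).mpr (by simp [hmem])
        have ih := loopA t' (PySem.Set.add (PySem.Set.add used a) (a + 1)) (p + 1) full h1' h2' h3'
        calc ((a :: b :: t').foldl (stepA full) (used, p)).2
            = (t'.foldl (stepA full) (PySem.Set.add (PySem.Set.add used a) (a + 1), p + 1)).2 := by
              rw [List.foldl_cons, step1, List.foldl_cons, step2]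
          _ = p + 1 + gp none t' := ih
          _ = p + gp none (a :: b :: t') := by simp [gp, hb]; ring
      · -- no pair for a
        have hfa : a + 1 ∉ full := by
          intro hc
          have hmem := (h3 a (by simp)).mp hc
          rcases List.mem_cons.mp hmem with h | h
          · omega
          rcases List.mem_cons.mp h with h' | h'
          · exact hb h'.symm
          · have := hbt _ h'; omega
        have step1 : stepA full (used, p) a = (used, p) := by
          simp [stepA, hca, hfa]
        have h1' : (b :: t').Pairwise (· < ·) := (List.pairwise_cons.mp h1).2
        have h2' : ∀ n ∈ b :: t', n ∉ used := by
          intro n hn; exact h2 n (by simp at hn ⊢; tauto)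
        have h3' : ∀ n : Int, n ∈ b :: t' → ((n + 1) ∈ full ↔ (n + 1) ∈ b :: t') := by
          intro n hn
          have hge : b ≤ n := by
            simp at hn
            rcases hn with h | h
            · omega
            · have := hbt n h; omega
          constructor
          · intro hc
            have := (h3 n (by simp at hn ⊢; tauto)).mp hc
            simp at this ⊢
            rcases this with h | h
            · omega
            · exact h
          · intro hmem
            refine (h3 n (by simp at hn ⊢; tauto)).mpr ?_
            simp at hmem ⊢; tauto
        have ih := loopA (b :: t') used p full h1' h2' h3'
        calc ((a :: b :: t').foldl (stepA full) (used, p)).2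
            = ((b :: t').foldl (stepA full) (used, p)).2 := by
              rw [List.foldl_cons, step1]
          _ = p + gp none (b :: t') := ih
          _ = p + gp none (a :: b :: t') := by simp [gp, hb]
termination_by t.length

theorem loopB (t : List Int) (p run total : Int) (hrun : 0 ≤ run) :
    (let st := t.foldl stepB (total, run, some p)
     st.1 + PySem.Int.floordiv st.2.1 2) =
      total + PySem.Int.floordiv run 2 +
        gp (if run % 2 = 1 then some p else none) t := by
  induction t generalizing p run total with
  | nil => simp [gp]
  | cons a t ih =>
      have h2 : (0:Int) < 2 := by norm_num
      by_cases hv : a = p + 1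
      · have step : stepB (total, run, some p) a = (total, run + 1, some a) := by
          simp [stepB, hv]
        have ih' := ih a (run + 1) total (by omega)
        simp only [List.foldl_cons, step]
        rw [ih']
        by_cases hp : run % 2 = 1
        · rw [if_neg (show ¬((run + 1) % 2 = 1) by omega), if_pos hp]
          simp only [PySem.Int.floordiv_eq_ediv_of_pos h2, gp, if_pos hv]
          generalize gp none t = G
          omega
        · rw [if_pos (show (run + 1) % 2 = 1 by omega), if_neg hp]
          simp only [PySem.Int.floordiv_eq_ediv_of_pos h2, gp]
          generalize gp (some a) t = G
          omega
      · have step : stepB (total, run, some p) a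
            = (total + PySem.Int.floordiv run 2, 1, some a) := by
          simp [stepB, hv]
        have ih' := ih a 1 (total + PySem.Int.floordiv run 2) (by omega)
        simp only [List.foldl_cons, step]
        rw [ih']
        rw [if_pos (show (1:Int) % 2 = 1 by omega)]
        by_cases hp : run % 2 = 1
        · rw [if_pos hp]
          simp only [PySem.Int.floordiv_eq_ediv_of_pos h2, gp, if_neg hv]
          generalize gp (some a) t = G
          omega
        · rw [if_neg hp]
          simp only [PySem.Int.floordiv_eq_ediv_of_pos h2, gp]
          generalize gp (some a) t = G
          omega

-- ===== VERDICT (by name: the statement is the Claim_ definition above) =====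
theorem count_adjacent_pairs_spec : Claim_equal_count_adjacent_pairs := by
  unfold Claim_equal_count_adjacent_pairs Spec_count_adjacent_pairs
  intro nums _
  unfold count_adjacent_pairs count_adjacent_pairs_alt
  set vals := PySem.List.sorted (PySem.Set.ofList nums) (fun x => x) false with hvals
  have hpw : vals.Pairwise (· < ·) := by
    rw [hvals]; exact PySem.List.sorted_ofList_pairwise_lt nums
  have hA : (vals.foldl (stepA vals) ((PySem.Set.empty : PySem.Set Int), 0)).2 = 0 + gp none vals := by
    refine loopA vals (PySem.Set.empty : PySem.Set Int) 0 vals hpw ?_ ?_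
    · intro n _ hc
      rw [show (PySem.Set.empty : PySem.Set Int) = [] from rfl] at hc
      exact List.not_mem_nil hc
    · intro n _; exact Iff.rfl
  simp only [hA]
  cases hv : vals with
  | nil => simp [gp]
  | cons a rest =>
      have step0 : stepB ((0:Int), (0:Int), (none : Option Int)) a = (0, 1, some a) := by
        simp [stepB]
      have hB := loopB rest a 1 0 (by norm_num)
      simp only [List.foldl_cons, step0]
      simp only [] at hB
      rw [hB]
      simp [gp]
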